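-- pv_equiv track=rewrite | github.com/DavidMoa26/Numerical-Analysis | helpers.py | matrixDLUdissasembly
-- ===== SOURCE A (Python) =====
-- def matrixDLUdissasembly(matrix):
--     D, L, U = list(), list(), list()
--     for x, row in enumerate(matrix):
--         D.append(list()), L.append(list()), U.append(list())
--         for y, value in enumerate(row):
--             # Diagonal with zeros
--             if x == y:
--                 D[x].append(value), L[x].append(0), U[x].append(0)
--             # Zeros below diagonal
--             elif x < y:
--                 D[x].append(0), L[x].append(0), U[x].append(value)
--             # Zeros above diagonal
--             elif x > y:
--                 D[x].append(0), L[x].append(value), U[x].append(0)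
--     return D, L, U
-- ===== SOURCE B (Python) =====
-- def matrixDLUdissasembly(matrix):
--     # Slice-and-pad per row: no per-element index comparison.
--     D, L, U = [], [], []
--     for x, row in enumerate(matrix):
--         n = len(row)
--         k = min(x, n)
--         L.append(row[:k] + [0] * (n - k))
--         d = [0] * n
--         if x < n:
--             d[x] = row[x]
--         D.append(d)
--         m = min(x + 1, n)
--         U.append([0] * m + row[m:])
--     return D, L, U
-- ===== Notes on version B (the rewrite author's own statement) =====
-- stated objective: alternative
-- what changed: Replaces A's per-element index-comparison classification by slice-and-pad row construction: each output row is built from take/drop slices of the input row padded with zero blocks (L = prefix of length min(x,n) plus zeros, D = zero row with one entry set, U = zero prefix plus tail), with no element-wise x-vs-y test.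
import Mathlib
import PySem

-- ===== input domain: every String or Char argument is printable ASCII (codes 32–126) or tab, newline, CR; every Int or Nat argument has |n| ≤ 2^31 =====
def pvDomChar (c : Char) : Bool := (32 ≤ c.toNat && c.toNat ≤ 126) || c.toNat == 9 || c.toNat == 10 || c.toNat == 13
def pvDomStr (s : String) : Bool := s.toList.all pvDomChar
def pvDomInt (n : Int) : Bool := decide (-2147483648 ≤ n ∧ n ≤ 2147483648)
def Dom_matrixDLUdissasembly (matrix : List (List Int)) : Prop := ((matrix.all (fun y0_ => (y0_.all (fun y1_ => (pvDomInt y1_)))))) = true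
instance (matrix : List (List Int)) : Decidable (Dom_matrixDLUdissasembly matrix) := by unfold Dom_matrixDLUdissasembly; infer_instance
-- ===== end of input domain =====

-- B builds each output row by slice-and-pad (take/replicate/set/drop) instead of A's per-element index-comparison loop (alternative; same cost).


-- ===== PORT A =====
-- inner loop: for y, value in enumerate(row): branch on x==y / x<y / x>y, appending to the three current rows
def pvInnerA (x : Int) (st : List Int × List Int × List Int) (p : Int × Int) :
    List Int × List Int × List Int :=
  let (dx, lx, ux) := st
  let (y, value) := p
  if x == y then (dx ++ [value], lx ++ [0], ux ++ [0])
  else if x < y then (dx ++ [0], lx ++ [0], ux ++ [value])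
  else (dx ++ [0], lx ++ [value], ux ++ [0])

-- outer loop: append a fresh (initially empty) row to each of D, L, U, then run the inner loop on it
def pvOuterA (st : List (List Int) × List (List Int) × List (List Int)) (p : Int × List Int) :
    List (List Int) × List (List Int) × List (List Int) :=
  let (D, L, U) := st
  let (x, row) := p
  let (dx, lx, ux) := (PySem.List.enumerate row).foldl (pvInnerA x) ([], [], [])
  (D ++ [dx], L ++ [lx], U ++ [ux])

def matrixDLUdissasembly (matrix : List (List Int)) : List (List Int) × List (List Int) × List (List Int) :=
  (PySem.List.enumerate matrix).foldl pvOuterA ([], [], [])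

-- ===== PORT B =====
-- per-row slice-and-pad construction: L-row = prefix + zeros, D-row = zero row with one entry set, U-row = zeros + tail
-- (x is the enumerate counter, always ≥ 0 in Source B, so it is carried as a Nat; row[:k] = take k, row[m:] = drop m for 0 ≤ k,m)
def pvRowB (x : Nat) (row : List Int) : List Int × List Int × List Int :=
  let n := row.length
  let k := min x n
  let lrow := row.take k ++ List.replicate (n - k) 0
  let d0 := List.replicate n 0
  let drow := if x < n then d0.set x (row.getD x 0) else d0
  let m := min (x + 1) n
  let urow := List.replicate m 0 ++ row.drop m
  (drow, lrow, urow)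

-- the loop 'for x, row in enumerate(matrix)' carried as structural recursion with the counter x
def pvRowsB (x : Nat) (rows : List (List Int)) :
    List (List Int) × List (List Int) × List (List Int) :=
  match rows with
  | [] => ([], [], [])
  | row :: rest =>
    let (d, l, u) := pvRowB x row
    let (D, L, U) := pvRowsB (x + 1) rest
    (d :: D, l :: L, u :: U)

def matrixDLUdissasembly_alt (matrix : List (List Int)) : List (List Int) × List (List Int) × List (List Int) :=
  pvRowsB 0 matrix

-- ===== PRECONDITION & SPEC =====
def Spec_matrixDLUdissasembly (matrix : List (List Int)) (out : List (List Int) × List (List Int) × List (List Int)) : Prop := out = matrixDLUdissasembly_alt matrix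
instance (matrix : List (List Int)) (out : List (List Int) × List (List Int) × List (List Int)) : Decidable (Spec_matrixDLUdissasembly matrix out) := by unfold Spec_matrixDLUdissasembly; infer_instance

-- ===== CLAIM (what is proved, stated in full; the proofs are below) =====
def Claim_equal_matrixDLUdissasembly : Prop := ∀ (matrix : List (List Int)), Dom_matrixDLUdissasembly matrix → Spec_matrixDLUdissasembly matrix (matrixDLUdissasembly matrix)

-- ===== LEMMAS AND PROOFS =====

-- A's inner fold over any list of (index, value) pairs builds exactly the three masked rows
theorem innerA_eq (x : Int) (ps : List (Int × Int)) (dx lx ux : List Int) :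
    ps.foldl (pvInnerA x) (dx, lx, ux) =
      (dx ++ ps.map (fun (y, v) => if x == y then v else 0),
       lx ++ ps.map (fun (y, v) => if x > y then v else 0),
       ux ++ ps.map (fun (y, v) => if x < y then v else 0)) := by
  induction ps generalizing dx lx ux with
  | nil => simp
  | cons p t ih =>
    obtain ⟨y, v⟩ := p
    rw [List.foldl_cons]
    by_cases h : x = y
    · have : pvInnerA x (dx, lx, ux) (y, v) = (dx ++ [v], lx ++ [0], ux ++ [0]) := by
        simp [pvInnerA, h]
      rw [this, ih]
      simp [h]
    · by_cases h2 : x < y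
      · have : pvInnerA x (dx, lx, ux) (y, v) = (dx ++ [0], lx ++ [0], ux ++ [v]) := by
          simp [pvInnerA, h, h2]
        rw [this, ih]
        simp [h, h2, not_lt_of_gt h2]
      · have h3 : x > y := lt_of_le_of_ne (le_of_not_gt h2) (Ne.symm h)
        have : pvInnerA x (dx, lx, ux) (y, v) = (dx ++ [0], lx ++ [v], ux ++ [0]) := by
          simp [pvInnerA, h, h2]
        rw [this, ih]
        simp [h, h2, h3]

-- B's slice-and-pad row equals A's three masked rows, componentwise
theorem rowB_eq (x : Nat) (row : List Int) :
    pvRowB x row =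
      ((PySem.List.enumerate row).map (fun (y, v) => if (x : Int) == y then v else 0),
       (PySem.List.enumerate row).map (fun (y, v) => if (x : Int) > y then v else 0),
       (PySem.List.enumerate row).map (fun (y, v) => if (x : Int) < y then v else 0)) := by
  unfold pvRowB
  refine Prod.ext ?_ (Prod.ext ?_ ?_) <;> simp only
  · -- D component
    apply List.ext_getElem
    · by_cases h : x < row.length <;> simp [h, PySem.List.length_enumerate]
    · intro i h1 h2
      have hi : i < row.length := by
        by_cases h : x < row.length <;> simpa [h] using h1
      by_cases h : x < row.length
      · simp only [h, if_true]
        rw [List.getElem_set]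
        by_cases hx : x = i
        · simp [hx, PySem.List.getElem_enumerate, List.getD_eq_getElem?_getD,
            List.getElem?_eq_getElem hi]
        · simp [hx, PySem.List.getElem_enumerate] <;> omega
      · simp [h, PySem.List.getElem_enumerate] <;> omega
  · -- L component
    apply List.ext_getElem
    · simp [PySem.List.length_enumerate] <;> omega
    · intro i h1 h2
      have hi : i < row.length := by
        simp [PySem.List.length_enumerate] at h2; exact h2
      by_cases h : i < min x row.length
      · rw [List.getElem_append_left (by simpa using h)]
        simp [PySem.List.getElem_enumerate, List.getElem_take] <;> omega
      · rw [List.getElem_append_right (by simp at h ⊢ <;> omega)]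
        simp [PySem.List.getElem_enumerate]
        intro hlt
        omega
  · -- U component
    apply List.ext_getElem
    · simp [PySem.List.length_enumerate] <;> omega
    · intro i h1 h2
      have hi : i < row.length := by
        simp [PySem.List.length_enumerate] at h2; exact h2
      by_cases h : i < min (x + 1) row.length
      · rw [List.getElem_append_left (by simpa using h)]
        simp [PySem.List.getElem_enumerate] <;> omega
      · rw [List.getElem_append_right (by simp at h ⊢ <;> omega)]
        have hval : row[min (x + 1) row.length + (i - min (x + 1) row.length)]'(by omega) = row[i] := by
          congr 1
          omega
        simp [PySem.List.getElem_enumerate, List.getElem_drop, hval] <;> omega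
  -- note: each component compares x against the enumerate index 0 + i

-- B's recursion equals the three mapped matrices from any counter
theorem rowsB_eq (rows : List (List Int)) (x : Nat) :
    pvRowsB x rows =
      ((PySem.List.enumerate rows (x : Int)).map (fun (i, row) =>
          (PySem.List.enumerate row).map (fun (y, v) => if i == y then v else 0)),
       (PySem.List.enumerate rows (x : Int)).map (fun (i, row) =>
          (PySem.List.enumerate row).map (fun (y, v) => if i > y then v else 0)),
       (PySem.List.enumerate rows (x : Int)).map (fun (i, row) =>
          (PySem.List.enumerate row).map (fun (y, v) => if i < y then v else 0))) := by
  induction rows generalizing x with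
  | nil => simp [pvRowsB, PySem.List.enumerate_nil]
  | cons row rest ih =>
    have hx : ((x : Int) + 1) = ((x + 1 : Nat) : Int) := by push_cast; ring
    simp only [pvRowsB, rowB_eq, PySem.List.enumerate_cons, List.map_cons, hx, ih]

-- A's outer fold over any list of (index, row) pairs builds exactly the three mapped matrices
theorem outerA_eq (ps : List (Int × List Int)) (D L U : List (List Int)) :
    ps.foldl pvOuterA (D, L, U) =
      (D ++ ps.map (fun (x, row) =>
          (PySem.List.enumerate row).map (fun (y, v) => if x == y then v else 0)),
       L ++ ps.map (fun (x, row) =>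
          (PySem.List.enumerate row).map (fun (y, v) => if x > y then v else 0)),
       U ++ ps.map (fun (x, row) =>
          (PySem.List.enumerate row).map (fun (y, v) => if x < y then v else 0))) := by
  induction ps generalizing D L U with
  | nil => simp
  | cons p t ih =>
    obtain ⟨x, row⟩ := p
    simp only [List.foldl_cons, pvOuterA, innerA_eq, List.map_cons]
    simp [ih]

-- ===== VERDICT (by name: the statement is the Claim_ definition above) =====
theorem matrixDLUdissasembly_spec : Claim_equal_matrixDLUdissasembly := by
  intro matrix _
  show _ = _
  have h0 : ((0 : Nat) : Int) = 0 := rfl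
  rw [matrixDLUdissasembly, matrixDLUdissasembly_alt, outerA_eq, rowsB_eq, h0]
  simp
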